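-- pv_equiv track=rewrite | github.com/Christopher-ai-ECM/LeafNothingBehind | deplace_data.py | find_previous
-- ===== SOURCE A (Python) =====
-- def find_previous(names, index):
--     name_2 = names[index]
--     name_0 = ''
--     name_1 = ''
--     for i, x in enumerate(name_2.split('-')):
--         if i != 5:
--             name_0 += x + '-'
--             name_1 += x + '-'
--         else:
--             name_0 += '0-'
--             name_1 += '1-'
--     return name_0[:-1], name_1[:-1]
-- ===== SOURCE B (Python) =====
-- def find_previous(names, index):
--     parts = names[index].split('-')
--     parts0 = list(parts)
--     parts1 = list(parts)
--     if len(parts) > 5: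
--         parts0[5] = '0'
--         parts1[5] = '1'
--     return '-'.join(parts0), '-'.join(parts1)
-- ===== Notes on version B (the rewrite author's own statement) =====
-- stated objective: simpler
-- what changed: Replaces the character-accumulating loop with trailing-dash trim by a single split, direct assignment at index 5 on two copies, and '-'.join.
import Mathlib
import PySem

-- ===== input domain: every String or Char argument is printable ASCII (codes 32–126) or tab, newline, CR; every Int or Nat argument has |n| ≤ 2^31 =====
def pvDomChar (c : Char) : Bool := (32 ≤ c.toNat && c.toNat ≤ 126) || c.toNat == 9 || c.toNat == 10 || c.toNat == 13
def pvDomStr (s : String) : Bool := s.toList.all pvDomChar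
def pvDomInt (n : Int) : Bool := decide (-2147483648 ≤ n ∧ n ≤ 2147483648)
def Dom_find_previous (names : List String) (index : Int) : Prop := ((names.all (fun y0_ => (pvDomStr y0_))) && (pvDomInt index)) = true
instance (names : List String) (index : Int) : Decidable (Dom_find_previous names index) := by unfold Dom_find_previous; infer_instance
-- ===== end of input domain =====

-- B replaces A's character-accumulating loop (with trailing-dash trim) by split, index assignment on two copies, and '-'.join; return value only, no mutation involved.

-- ===== PORT A =====
-- the loop body of A's 'for i, x in enumerate(name_2.split('-'))'
def fpStep (acc : String × String) (p : Int × String) : String × String :=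
  if p.1 ≠ 5 then (acc.1 ++ p.2 ++ "-", acc.2 ++ p.2 ++ "-")
  else (acc.1 ++ "0-", acc.2 ++ "1-")

def find_previous (names : List String) (index : Int) : String × String :=
  let name_2 := PySem.List.pyGetD names index ""   -- names[index]; in range under Pre_
  -- split? with sep "-" ≠ "" is always some; getD [] only discharges the Option
  let r := (PySem.List.enumerate ((PySem.Str.split? name_2 "-").getD [])).foldl fpStep ("", "")
  (PySem.Str.slice r.1 none (some (-1)), PySem.Str.slice r.2 none (some (-1)))

-- ===== PORT B =====
def find_previous_alt (names : List String) (index : Int) : String × String :=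
  let parts := (PySem.Str.split? (PySem.List.pyGetD names index "") "-").getD []
  let parts0 := if 5 < parts.length then parts.set 5 "0" else parts
  let parts1 := if 5 < parts.length then parts.set 5 "1" else parts
  (PySem.Str.join "-" parts0, PySem.Str.join "-" parts1)

-- ===== PRECONDITION & SPEC =====
-- Pre_ excludes exactly the inputs where names[index] raises IndexError (both A and B raise there).
def Pre_find_previous (names : List String) (index : Int) : Prop :=
  PySem.Raise.InRange names.length index
instance (names : List String) (index : Int) : Decidable (Pre_find_previous names index) := by unfold Pre_find_previous; infer_instance
def pvWitness_find_previous : List String × Int := (["a-b-c-d-e-f-g"], 0)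

def Spec_find_previous (names : List String) (index : Int) (out : String × String) : Prop := out = find_previous_alt names index
instance (names : List String) (index : Int) (out : String × String) : Decidable (Spec_find_previous names index out) := by unfold Spec_find_previous; infer_instance

-- ===== CLAIM (what is proved, stated in full; the proofs are below) =====
def Claim_equal_find_previous : Prop := ∀ (names : List String) (index : Int), Dom_find_previous names index → Pre_find_previous names index → Spec_find_previous names index (find_previous names index)

-- ===== LEMMAS AND PROOFS =====

-- the string A's loop accumulates (one component, replacement c at absolute index 5)
def tagS (c : String) (k : Nat) : List String → String
  | [] => ""
  | x :: xs => (if k ≠ 5 then x else c) ++ "-" ++ tagS c (k + 1) xs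

-- the token list after replacing the token at absolute index 5 (running counter k)
def replS (c : String) (k : Nat) : List String → List String
  | [] => []
  | x :: xs => (if k ≠ 5 then x else c) :: replS c (k + 1) xs

lemma fold_eq (parts : List String) : ∀ (k : Nat) (acc0 acc1 : String),
    (PySem.List.enumerate parts (k : Int)).foldl fpStep (acc0, acc1)
      = (acc0 ++ tagS "0" k parts, acc1 ++ tagS "1" k parts) := by
  induction parts with
  | nil => intro k acc0 acc1; simp [PySem.List.enumerate_nil, tagS]
  | cons x xs ih =>
    intro k acc0 acc1
    have hc : ((k : Int) + 1) = ((k + 1 : Nat) : Int) := by push_cast; ring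
    rw [PySem.List.enumerate_cons, List.foldl_cons, fpStep]
    by_cases h5 : k = 5
    · rw [if_neg (by simp [h5] : ¬ ((k : Int) ≠ 5)), hc, ih]
      have h0 : ("0-" : String) = "0" ++ "-" := by decide
      have h1 : ("1-" : String) = "1" ++ "-" := by decide
      simp [tagS, h5, h0, h1, String.append_assoc]
    · rw [if_pos (by intro h; exact h5 (by exact_mod_cast h) : ((k : Int) ≠ 5)), hc, ih]
      simp [tagS, h5, String.append_assoc]

lemma tagS_toList_ne_nil (c : String) (k : Nat) (x : String) (xs : List String) :
    (tagS c k (x :: xs)).toList ≠ [] := by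
  simp [tagS]

lemma tag_join (c : String) : ∀ (parts : List String) (k : Nat),
    (tagS c k parts).toList.dropLast
      = (PySem.Str.join "-" (replS c k parts)).toList := by
  intro parts
  induction parts with
  | nil => intro k; simp [tagS, replS, PySem.Str.toList_join, PySem.Chars.join_nil]
  | cons x xs ih =>
    intro k
    cases xs with
    | nil =>
      simp [tagS, replS, PySem.Str.toList_join, PySem.Chars.join_singleton]
    | cons y ys =>
      have hne : (tagS c (k + 1) (y :: ys)).toList ≠ [] := tagS_toList_ne_nil c (k + 1) y ys
      have h1 : tagS c k (x :: y :: ys)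
          = (if k ≠ 5 then x else c) ++ "-" ++ tagS c (k + 1) (y :: ys) := rfl
      have h2 : replS c k (x :: y :: ys)
          = (if k ≠ 5 then x else c) :: replS c (k + 1) (y :: ys) := rfl
      have h3 : replS c (k + 1) (y :: ys)
          = (if k + 1 ≠ 5 then y else c) :: replS c (k + 2) ys := rfl
      rw [h1, h2, String.toList_append, String.toList_append, List.append_assoc,
          List.dropLast_append_of_ne_nil (by simp),
          List.dropLast_append_of_ne_nil hne, ih (k + 1), h3]
      simp only [PySem.Str.toList_join, List.map_cons, PySem.Chars.join_cons_cons]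
      simp [List.append_assoc]

lemma repl_set (c : String) : ∀ (parts : List String) (k : Nat),
    replS c k parts = if 5 < k + parts.length ∧ k ≤ 5 then parts.set (5 - k) c else parts := by
  intro parts
  induction parts with
  | nil => intro k; simp [replS]
  | cons x xs ih =>
    intro k
    simp only [replS, ih (k + 1), List.length_cons]
    by_cases hk : k = 5
    · subst hk
      rw [if_neg (by simp : ¬ ((5 : Nat) ≠ 5)),
          if_neg (by omega : ¬ (5 < 5 + 1 + xs.length ∧ 5 + 1 ≤ 5)),
          if_pos (⟨by omega, by omega⟩ : 5 < 5 + (xs.length + 1) ∧ 5 ≤ 5)]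
      simp [List.set]
    · rw [if_pos hk]
      by_cases hb : 5 < k + 1 + xs.length ∧ k + 1 ≤ 5
      · rw [if_pos hb, if_pos ⟨by omega, by omega⟩,
            (by omega : 5 - k = (5 - (k + 1)) + 1)]
        simp [List.set]
      · rw [if_neg hb, if_neg (by omega)]

-- ===== VERDICT (by name: the statement is the Claim_ definition above) =====
theorem find_previous_spec : Claim_equal_find_previous := by
  intro names index _ _
  unfold Spec_find_previous find_previous find_previous_alt
  dsimp only
  set parts := (PySem.Str.split? (PySem.List.pyGetD names index "") "-").getD [] with hparts
  have h0 : ((0 : Int)) = ((0 : Nat) : Int) := by norm_num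
  rw [h0, fold_eq parts 0 "" ""]
  have key : ∀ c : String,
      PySem.Str.slice ("" ++ tagS c 0 parts) none (some (-1))
        = PySem.Str.join "-" (if 5 < parts.length then parts.set 5 c else parts) := by
    intro c
    rw [← String.toList_inj, PySem.Str.slice_to_neg_one]
    have := tag_join c parts 0
    rw [String.empty_append, this, repl_set c parts 0]
    simp
  rw [Prod.mk.injEq]
  exact ⟨key "0", key "1"⟩
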